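-- pv_equiv track=rewrite | github.com/eno2307/RSA | RSAmaker.py | wide_euclid
-- ===== SOURCE A (Python) =====
-- def wide_euclid(quo, i):
--     #逆元の配列
--     alpha = []
--     beta = []
--     for j in range(i+1):
--         if(j == 0): #j=0
--             alpha.append(1)
--             beta.append(0)
--         elif(j == 1): #j=1
--             alpha.append(0)
--             beta.append(1)
--         else: #j>=2における漸化式
--             alpha.append(alpha[j-2]-quo[j-1]*alpha[j-1])
--             beta.append(beta[j-2]-quo[j-1]*beta[j-1])
--     return beta[j]
-- ===== SOURCE B (Python) =====
-- def wide_euclid(quo, i):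
--     # beta_i is the bottom-right entry of the product of companion matrices
--     # [[0,1],[1,-quo[k]]] for k = 1 .. i-1, computed by divide and conquer.
--     if i == 0:
--         return 0
--
--     def prod(lo, hi):  # product of the matrices for quo indices lo .. hi-1
--         if hi - lo == 0:
--             return (1, 0, 0, 1)
--         if hi - lo == 1:
--             return (0, 1, 1, -quo[lo])
--         mid = (lo + hi) // 2
--         a, b, c, d = prod(lo, mid)
--         e, f, g, h = prod(mid, hi)
--         return (a * e + b * g, a * f + b * h, c * e + d * g, c * f + d * h)
--
--     return prod(1, i)[3]
-- ===== Notes on version B (the rewrite author's own statement) =====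
-- stated objective: alternative
-- what changed: Replaces the linear list-building recurrence (with a dead alpha array) by a divide-and-conquer product of 2x2 companion matrices [[0,1],[1,-q]] over quo[1..i-1]; beta_i is the bottom-right entry of that product.
import Mathlib
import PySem

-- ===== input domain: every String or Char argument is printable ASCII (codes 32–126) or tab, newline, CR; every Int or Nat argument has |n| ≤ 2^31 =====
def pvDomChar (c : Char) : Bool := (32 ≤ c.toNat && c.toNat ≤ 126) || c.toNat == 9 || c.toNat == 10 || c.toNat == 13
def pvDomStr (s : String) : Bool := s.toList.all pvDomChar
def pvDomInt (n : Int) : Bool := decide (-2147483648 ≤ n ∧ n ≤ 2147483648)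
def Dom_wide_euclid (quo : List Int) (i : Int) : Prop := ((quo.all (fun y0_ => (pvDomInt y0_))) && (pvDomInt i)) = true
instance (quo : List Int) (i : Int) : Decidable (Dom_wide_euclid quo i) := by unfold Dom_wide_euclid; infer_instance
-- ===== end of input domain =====

-- B computes beta_i as the bottom-right entry of a divide-and-conquer product of 2x2
-- companion matrices [[0,1],[1,-quo[k]]] for k = 1..i-1 (a different algorithm; not faster).

-- ===== PORT A =====
-- loop body of A's 'for j in range(i+1)': state is (alpha, beta, last j); list indexing via pyGetD
-- (total stand-in for xs[k]; in range under Pre_, exact there)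
def wideEuclidStepA (quo : List Int) (st : List Int × List Int × Int) (j : Int) :
    List Int × List Int × Int :=
  if j == 0 then (st.1 ++ [1], st.2.1 ++ [0], j)
  else if j == 1 then (st.1 ++ [0], st.2.1 ++ [1], j)
  else (st.1 ++ [PySem.List.pyGetD st.1 (j-2) 0 - PySem.List.pyGetD quo (j-1) 0 * PySem.List.pyGetD st.1 (j-1) 0],
        st.2.1 ++ [PySem.List.pyGetD st.2.1 (j-2) 0 - PySem.List.pyGetD quo (j-1) 0 * PySem.List.pyGetD st.2.1 (j-1) 0],
        j)

def wide_euclid (quo : List Int) (i : Int) : Int :=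
  let st := (PySem.List.pyRange 0 (i+1) 1).foldl (wideEuclidStepA quo) ([], [], 0)
  PySem.List.pyGetD st.2.1 st.2.2 0

-- ===== PORT B =====
-- B's helper 'prod(lo, hi)': product of companion matrices for quo indices lo..hi-1,
-- a 2x2 matrix held as a 4-tuple (a, b, c, d) row-major, split at the midpoint.
-- The 'hi - lo < 0' branch guards termination only: Python's prod diverges there,
-- which is unreachable under Pre_ (B is called with lo = 1 ≤ hi = i).
def wideEuclidProdB (quo : List Int) (lo hi : Int) : Int × Int × Int × Int :=
  if hi - lo = 0 then (1, 0, 0, 1)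
  else if hi - lo = 1 then (0, 1, 1, -(PySem.List.pyGetD quo lo 0))
  else if hi - lo < 0 then (1, 0, 0, 1)
  else
    let mid := PySem.Int.floordiv (lo + hi) 2
    let L := wideEuclidProdB quo lo mid
    let R := wideEuclidProdB quo mid hi
    (L.1 * R.1 + L.2.1 * R.2.2.1, L.1 * R.2.1 + L.2.1 * R.2.2.2,
     L.2.2.1 * R.1 + L.2.2.2 * R.2.2.1, L.2.2.1 * R.2.1 + L.2.2.2 * R.2.2.2)
termination_by (hi - lo).toNat
decreasing_by
  · have h := PySem.Int.floordiv_eq_ediv_of_pos (a := lo + hi) (b := 2) (by omega)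
    simp only [h] at *; omega
  · have h := PySem.Int.floordiv_eq_ediv_of_pos (a := lo + hi) (b := 2) (by omega)
    simp only [h] at *; omega

def wide_euclid_alt (quo : List Int) (i : Int) : Int :=
  if i == 0 then 0
  else (wideEuclidProdB quo 1 i).2.2.2

-- ===== PRECONDITION & SPEC =====
-- Pre_ excludes exactly the inputs where Python A raises: i < 0 (UnboundLocalError: j never bound)
-- and i ≥ 2 with len(quo) < i (IndexError on quo[j-1]).
def Pre_wide_euclid (quo : List Int) (i : Int) : Prop :=
  0 ≤ i ∧ (2 ≤ i → i ≤ (quo.length : Int))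
instance (quo : List Int) (i : Int) : Decidable (Pre_wide_euclid quo i) := by
  unfold Pre_wide_euclid; infer_instance

def pvWitness_wide_euclid : List Int × Int := ([3, 2, 4, 1], 4)

def Spec_wide_euclid (quo : List Int) (i : Int) (out : Int) : Prop := out = wide_euclid_alt quo i
instance (quo : List Int) (i : Int) (out : Int) : Decidable (Spec_wide_euclid quo i out) := by
  unfold Spec_wide_euclid; infer_instance

-- ===== CLAIM (what is proved, stated in full; the proofs are below) =====
def Claim_equal_wide_euclid : Prop := ∀ (quo : List Int) (i : Int), Dom_wide_euclid quo i → Pre_wide_euclid quo i → Spec_wide_euclid quo i (wide_euclid quo i)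

-- ===== LEMMAS AND PROOFS =====

-- the mathematical beta recurrence (proof-only helper)
def betaF (quo : List Int) : Nat → Int
  | 0 => 0
  | 1 => 1
  | (k+2) => betaF quo k - quo.getD (k+1) 0 * betaF quo (k+1)

-- the (dead) alpha recurrence, needed only to describe A's full loop state
def alphaF (quo : List Int) : Nat → Int
  | 0 => 1
  | 1 => 0
  | (k+2) => alphaF quo k - quo.getD (k+1) 0 * alphaF quo (k+1)

-- 2x2 matrix multiplication on row-major 4-tuples (proof-only)
def mmul (x y : Int × Int × Int × Int) : Int × Int × Int × Int :=
  (x.1 * y.1 + x.2.1 * y.2.2.1, x.1 * y.2.1 + x.2.1 * y.2.2.2,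
   x.2.2.1 * y.1 + x.2.2.2 * y.2.2.1, x.2.2.1 * y.2.1 + x.2.2.2 * y.2.2.2)

def matOf (quo : List Int) (k : Nat) : Int × Int × Int × Int :=
  (0, 1, 1, -(quo.getD k 0))

-- left-to-right product of n companion matrices starting at index lo (proof-only reference)
def linProd (quo : List Int) (lo : Nat) : Nat → Int × Int × Int × Int
  | 0 => (1, 0, 0, 1)
  | (n+1) => mmul (matOf quo lo) (linProd quo (lo+1) n)

lemma mmul_one_left (x : Int × Int × Int × Int) : mmul (1, 0, 0, 1) x = x := by
  simp [mmul]

lemma mmul_one_right (x : Int × Int × Int × Int) : mmul x (1, 0, 0, 1) = x := by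
  simp [mmul]

lemma mmul_assoc (x y z : Int × Int × Int × Int) :
    mmul (mmul x y) z = mmul x (mmul y z) := by
  simp only [mmul, Prod.ext_iff]
  refine ⟨by ring, by ring, by ring, by ring⟩

lemma linProd_append (quo : List Int) (m n : Nat) : ∀ lo : Nat,
    linProd quo lo (m + n) = mmul (linProd quo lo m) (linProd quo (lo + m) n) := by
  induction m with
  | zero => intro lo; simp [linProd, mmul_one_left]
  | succ k ih =>
      intro lo
      have : k + 1 + n = (k + n) + 1 := by omega
      rw [this]
      show mmul (matOf quo lo) (linProd quo (lo+1) (k + n)) = _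
      rw [ih (lo+1), ← mmul_assoc]
      have : lo + 1 + k = lo + (k + 1) := by omega
      rw [this]
      rfl

lemma matProd_eq_lin (quo : List Int) : ∀ (n : Nat) (lo hi : Int), 0 ≤ lo →
    (hi - lo).toNat = n → wideEuclidProdB quo lo hi = linProd quo lo.toNat n := by
  intro n
  induction n using Nat.strong_induction_on with
  | _ n ih =>
    intro lo hi hlo hn
    rw [wideEuclidProdB]
    split_ifs with h0 h1 hneg
    · simp [show n = 0 by omega, linProd]
    · have hn1 : n = 1 := by omega
      have hcast : lo = ((lo.toNat : Nat) : Int) := by omega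
      rw [hn1]
      show _ = mmul (matOf quo lo.toNat) (1, 0, 0, 1)
      rw [mmul_one_right, matOf, hcast, PySem.List.pyGetD_natCast, Int.toNat_natCast]
    · simp [show n = 0 by omega, linProd]
    · -- recursive case: hi - lo ≥ 2
      have h2 : 2 ≤ hi - lo := by omega
      have hmid : PySem.Int.floordiv (lo + hi) 2 = (lo + hi) / 2 :=
        PySem.Int.floordiv_eq_ediv_of_pos (by omega)
      have hb1 : lo < PySem.Int.floordiv (lo + hi) 2 := by rw [hmid]; omega
      have hb2 : PySem.Int.floordiv (lo + hi) 2 < hi := by rw [hmid]; omega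
      have hL := ih (PySem.Int.floordiv (lo + hi) 2 - lo).toNat (by omega) lo
        (PySem.Int.floordiv (lo + hi) 2) hlo rfl
      have hR := ih (hi - PySem.Int.floordiv (lo + hi) 2).toNat (by omega)
        (PySem.Int.floordiv (lo + hi) 2) hi (by omega) rfl
      simp only [hL, hR]
      have hsplit : n = (PySem.Int.floordiv (lo + hi) 2 - lo).toNat +
          (hi - PySem.Int.floordiv (lo + hi) 2).toNat := by omega
      have hmidNat : (PySem.Int.floordiv (lo + hi) 2).toNat =
          lo.toNat + (PySem.Int.floordiv (lo + hi) 2 - lo).toNat := by omega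
      rw [hsplit, linProd_append quo _ _ lo.toNat, ← hmidNat]
      rfl

lemma lin_beta (quo : List Int) : ∀ n : Nat,
    (linProd quo 1 n).2.2.1 = betaF quo n ∧ (linProd quo 1 n).2.2.2 = betaF quo (n+1) := by
  intro n
  induction n with
  | zero => simp [linProd, betaF]
  | succ k ih =>
      rw [linProd_append quo k 1 1]
      obtain ⟨hc, hd⟩ := ih
      have hstep : linProd quo (1+k) 1 = matOf quo (1+k) := by
        show mmul (matOf quo (1+k)) (1,0,0,1) = _
        rw [mmul_one_right]
      rw [hstep]
      have h1k : 1 + k = k + 1 := Nat.add_comm 1 k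
      constructor
      · simp [mmul, matOf, hc, hd]
      · simp only [mmul, matOf, hc, hd, h1k]
        show betaF quo k * 1 + betaF quo (k+1) * -(quo.getD (k+1) 0) = betaF quo (k+2)
        simp only [betaF]; ring

-- A's full loop state, characterised by the two recurrences
lemma stA_eq (quo : List Int) (n : Nat) :
    (PySem.List.pyRange 0 ((n : Int)+1) 1).foldl (wideEuclidStepA quo) ([], [], 0) =
      ((List.range (n+1)).map (alphaF quo), (List.range (n+1)).map (betaF quo), (n : Int)) := by
  induction n with
  | zero =>
      push_cast
      rw [show PySem.List.pyRange 0 1 1 = [0] from by decide]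
      simp [wideEuclidStepA, alphaF, betaF, List.range_succ]
  | succ m ih =>
      have hcast : ((m+1 : Nat) : Int) + 1 = ((m : Int) + 1) + 1 := by push_cast; ring
      rw [hcast, PySem.List.pyRange_one_succ_right (by positivity), List.foldl_append]
      rw [ih]
      simp only [List.foldl_cons, List.foldl_nil]
      rw [show (m : Int) + 1 = ((m+1 : Nat) : Int) by push_cast; ring]
      cases m with
      | zero =>
          simp [wideEuclidStepA, List.range_succ, alphaF, betaF]
      | succ k =>
          unfold wideEuclidStepA
          rw [if_neg (by simp; omega), if_neg (by simp; omega)]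
          rw [show ((k+1+1 : Nat) : Int) - 2 = ((k : Nat) : Int) by push_cast; ring,
              show ((k+1+1 : Nat) : Int) - 1 = ((k+1 : Nat) : Int) by push_cast; ring]
          simp only [PySem.List.pyGetD_natCast]
          have hga : ∀ f : Nat → Int, ((List.range (k+1+1)).map f).getD k 0 = f k := by
            intro f; rw [List.getD_eq_getElem] <;> simp
          have hgb : ∀ f : Nat → Int, ((List.range (k+1+1)).map f).getD (k+1) 0 = f (k+1) := by
            intro f; rw [List.getD_eq_getElem] <;> simp
          rw [hga, hga, hgb, hgb]
          rw [Prod.ext_iff, Prod.ext_iff]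
          refine ⟨?_, ?_, rfl⟩
          · rw [List.range_succ (n := k+2), List.map_append]
            simp [alphaF]
          · rw [List.range_succ (n := k+2), List.map_append]
            simp [betaF]

-- ===== VERDICT (by name: the statement is the Claim_ definition above) =====
theorem wide_euclid_spec : Claim_equal_wide_euclid := by
  intro quo i _ hpre
  unfold Spec_wide_euclid
  obtain ⟨hi, -⟩ := hpre
  obtain ⟨n, rfl⟩ : ∃ n : Nat, i = (n : Int) := ⟨i.toNat, (Int.toNat_of_nonneg hi).symm⟩
  unfold wide_euclid wide_euclid_alt
  rw [stA_eq]
  cases n with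
  | zero => simp [betaF]
  | succ m =>
      rw [if_neg (by simp; omega)]
      rw [matProd_eq_lin quo ((((m+1 : Nat) : Int)) - 1).toNat 1 ((m+1 : Nat) : Int) (by omega) rfl]
      have : ((((m+1 : Nat) : Int)) - 1).toNat = m := by omega
      rw [this, show (1 : Int).toNat = 1 from rfl]
      rw [(lin_beta quo m).2]
      simp only [PySem.List.pyGetD_natCast]
      rw [List.getD_eq_getElem] <;> simp
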